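-- pv_equiv track=rewrite | github.com/hiro4honda/phoneme-balance-sentence-extractor | extract_balance_sentence.py | count_phoneme_chain2
-- ===== SOURCE A (Python) =====
-- phoneVowel = ['a', 'i', 'u', 'e', 'o']
--
-- phoneConsonant = ['k', 'ky', 'kw', 'g', 'gy', 'gw', 's', 'sh', 'j', 'cl', 'ts', 'z', 't', 'ch', 'ty', 'd', 'dy', \
--                   'n', 'ny', 'h', 'hy', 'b', 'by', 'p', 'py', 'f', 'm', 'my', 'y', 'ry', 'r', 'w', 'N', 'v']
--
-- def count_phoneme_chain2(phonemes):
--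
--     cv_dic = {}
--     vc_dic = {}
--     vv_dic = {}
--
--     for i in range(0, len(phoneConsonant)):
--         for j in range(0, len(phoneVowel)):
--             cv_dic[phoneConsonant[i] + ' ' + phoneVowel[j]] = 0
--
--     for i in range(0, len(phoneVowel)):
--         for j in range(0, len(phoneConsonant)):
--             vc_dic[phoneVowel[i] + ' ' + phoneConsonant[j]] = 0
--
--     for i in range(0, len(phoneVowel)):
--         for j in range(0, len(phoneVowel)):
--             vv_dic[phoneVowel[i] + ' ' + phoneVowel[j]] = 0
--
--
--     for i in range(0, len(phonemes)):
--         w = phonemes[i].split()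
--         for j in range(1, len(w)):
--             key = w[j-1] + ' ' + w[j]
--             if key in cv_dic:
--                 val = cv_dic[key]
--                 cv_dic[key] = val + 1
--
--             if key in vc_dic:
--                 val = vc_dic[key]
--                 vc_dic[key] = val + 1
--
--             if key in vv_dic:
--                 val = vv_dic[key]
--                 vv_dic[key] = val + 1
--
--     return cv_dic, vc_dic, vv_dic
-- ===== SOURCE B (Python) =====
-- phoneVowel = ['a', 'i', 'u', 'e', 'o']
--
-- phoneConsonant = ['k', 'ky', 'kw', 'g', 'gy', 'gw', 's', 'sh', 'j', 'cl', 'ts', 'z', 't', 'ch', 'ty', 'd', 'dy', \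
--                   'n', 'ny', 'h', 'hy', 'b', 'by', 'p', 'py', 'f', 'm', 'my', 'y', 'ry', 'r', 'w', 'N', 'v']
--
-- def count_phoneme_chain2(phonemes):
--     # one counting pass over all adjacent pairs, then classify by the fixed key sets
--     counts = {}
--     for p in phonemes:
--         w = p.split()
--         for a, b in zip(w, w[1:]):
--             key = a + ' ' + b
--             counts[key] = counts.get(key, 0) + 1
--     cv_dic = {c + ' ' + v: counts.get(c + ' ' + v, 0) for c in phoneConsonant for v in phoneVowel}
--     vc_dic = {v + ' ' + c: counts.get(v + ' ' + c, 0) for v in phoneVowel for c in phoneConsonant}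
--     vv_dic = {x + ' ' + y: counts.get(x + ' ' + y, 0) for x in phoneVowel for y in phoneVowel}
--     return cv_dic, vc_dic, vv_dic
-- ===== Notes on version B (the rewrite author's own statement) =====
-- stated objective: alternative
-- what changed: B replaces A's three per-pair membership tests and in-place dict updates by one counting pass that accumulates every adjacent pair into a single dict, then rebuilds cv/vc/vv by comprehensions over the fixed key sets with counts.get(key, 0).
import Mathlib
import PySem

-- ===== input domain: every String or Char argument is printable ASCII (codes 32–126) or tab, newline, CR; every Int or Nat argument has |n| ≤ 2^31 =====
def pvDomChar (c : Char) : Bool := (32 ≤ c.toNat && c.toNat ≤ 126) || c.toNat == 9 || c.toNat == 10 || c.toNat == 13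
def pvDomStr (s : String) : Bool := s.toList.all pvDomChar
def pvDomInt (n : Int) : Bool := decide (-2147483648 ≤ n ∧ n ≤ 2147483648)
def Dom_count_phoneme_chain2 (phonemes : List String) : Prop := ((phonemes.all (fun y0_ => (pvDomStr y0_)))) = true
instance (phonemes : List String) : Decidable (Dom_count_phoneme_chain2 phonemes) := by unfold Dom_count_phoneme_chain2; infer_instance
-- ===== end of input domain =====

-- B replaces A's three per-pair membership tests with in-place updates by one counting pass into a
-- single dict followed by dict comprehensions over the fixed key sets (objective: alternative decomposition).

-- ===== PORT A =====
def phoneVowel : List String := ["a", "i", "u", "e", "o"]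

def phoneConsonant : List String := ["k", "ky", "kw", "g", "gy", "gw", "s", "sh", "j", "cl", "ts", "z", "t", "ch", "ty", "d", "dy",
  "n", "ny", "h", "hy", "b", "by", "p", "py", "f", "m", "my", "y", "ry", "r", "w", "N", "v"]

-- A-side helper: the body of A's loop over phonemes (the inner 'for j in range(1, len(w))' loop)
def pvInnerA (t : (PySem.Dict String Int) × (PySem.Dict String Int) × (PySem.Dict String Int)) (s : String) :
    (PySem.Dict String Int) × (PySem.Dict String Int) × (PySem.Dict String Int) :=
  let w := PySem.Str.split₀ s
  (PySem.List.pyRange 1 (PySem.List.len w) 1).foldl (fun t j =>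
    let key := PySem.List.pyGetD w (j - 1) "" ++ " " ++ PySem.List.pyGetD w j ""
    let cv := if t.1.contains key then t.1.insert key (t.1.getD key 0 + 1) else t.1
    let vc := if t.2.1.contains key then t.2.1.insert key (t.2.1.getD key 0 + 1) else t.2.1
    let vv := if t.2.2.contains key then t.2.2.insert key (t.2.2.getD key 0 + 1) else t.2.2
    (cv, vc, vv)) t

def count_phoneme_chain2 (phonemes : List String) : (List (String × Int)) × (List (String × Int)) × (List (String × Int)) :=
  let cv0 : PySem.Dict String Int :=
    (PySem.List.pyRange 0 (PySem.List.len phoneConsonant) 1).foldl (fun d i =>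
      (PySem.List.pyRange 0 (PySem.List.len phoneVowel) 1).foldl (fun d j =>
        d.insert (PySem.List.pyGetD phoneConsonant i "" ++ " " ++ PySem.List.pyGetD phoneVowel j "") 0) d)
      PySem.Dict.empty
  let vc0 : PySem.Dict String Int :=
    (PySem.List.pyRange 0 (PySem.List.len phoneVowel) 1).foldl (fun d i =>
      (PySem.List.pyRange 0 (PySem.List.len phoneConsonant) 1).foldl (fun d j =>
        d.insert (PySem.List.pyGetD phoneVowel i "" ++ " " ++ PySem.List.pyGetD phoneConsonant j "") 0) d)
      PySem.Dict.empty
  let vv0 : PySem.Dict String Int :=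
    (PySem.List.pyRange 0 (PySem.List.len phoneVowel) 1).foldl (fun d i =>
      (PySem.List.pyRange 0 (PySem.List.len phoneVowel) 1).foldl (fun d j =>
        d.insert (PySem.List.pyGetD phoneVowel i "" ++ " " ++ PySem.List.pyGetD phoneVowel j "") 0) d)
      PySem.Dict.empty
  let res :=
    (PySem.List.pyRange 0 (PySem.List.len phonemes) 1).foldl (fun t i =>
      pvInnerA t (PySem.List.pyGetD phonemes i "")) (cv0, vc0, vv0)
  (res.1.items, res.2.1.items, res.2.2.items)

-- ===== PORT B =====
-- B-side helper: the adjacent-pair keys of one phoneme string ('zip(w, w[1:])')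
def pvPairsOf (p : String) : List String :=
  let w := PySem.Str.split₀ p
  (w.zip w.tail).map (fun ab => ab.1 ++ " " ++ ab.2)

def count_phoneme_chain2_alt (phonemes : List String) : (List (String × Int)) × (List (String × Int)) × (List (String × Int)) :=
  let counts : PySem.Dict String Int :=
    phonemes.foldl (fun d p => (pvPairsOf p).foldl (fun d key => d.insert key (d.getD key 0 + 1)) d) PySem.Dict.empty
  let cv := (phoneConsonant.flatMap (fun c => phoneVowel.map (fun v => c ++ " " ++ v))).foldl
    (fun d k => d.insert k (counts.getD k 0)) (PySem.Dict.empty : PySem.Dict String Int)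
  let vc := (phoneVowel.flatMap (fun v => phoneConsonant.map (fun c => v ++ " " ++ c))).foldl
    (fun d k => d.insert k (counts.getD k 0)) (PySem.Dict.empty : PySem.Dict String Int)
  let vv := (phoneVowel.flatMap (fun x => phoneVowel.map (fun y => x ++ " " ++ y))).foldl
    (fun d k => d.insert k (counts.getD k 0)) (PySem.Dict.empty : PySem.Dict String Int)
  (cv.items, vc.items, vv.items)

-- ===== PRECONDITION & SPEC =====
def Spec_count_phoneme_chain2 (phonemes : List String) (out : (List (String × Int)) × (List (String × Int)) × (List (String × Int))) : Prop := out = count_phoneme_chain2_alt phonemes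
instance (phonemes : List String) (out : (List (String × Int)) × (List (String × Int)) × (List (String × Int))) : Decidable (Spec_count_phoneme_chain2 phonemes out) := by unfold Spec_count_phoneme_chain2; infer_instance

-- ===== CLAIM (what is proved, stated in full; the proofs are below) =====
def Claim_equal_count_phoneme_chain2 : Prop := ∀ (phonemes : List String), Dom_count_phoneme_chain2 phonemes → Spec_count_phoneme_chain2 phonemes (count_phoneme_chain2 phonemes)

-- ===== LEMMAS AND PROOFS =====

-- the three fixed key lists
def pvCvKeys : List String := phoneConsonant.flatMap (fun c => phoneVowel.map (fun v => c ++ " " ++ v))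
def pvVcKeys : List String := phoneVowel.flatMap (fun v => phoneConsonant.map (fun c => v ++ " " ++ c))
def pvVvKeys : List String := phoneVowel.flatMap (fun x => phoneVowel.map (fun y => x ++ " " ++ y))

-- A's per-key update of one dict, and of the triple
def pvUpd (d : PySem.Dict String Int) (key : String) : PySem.Dict String Int :=
  if d.contains key then d.insert key (d.getD key 0 + 1) else d

def pvStep (t : (PySem.Dict String Int) × (PySem.Dict String Int) × (PySem.Dict String Int)) (key : String) :
    (PySem.Dict String Int) × (PySem.Dict String Int) × (PySem.Dict String Int) :=
  (pvUpd t.1 key, pvUpd t.2.1 key, pvUpd t.2.2 key)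

set_option maxRecDepth 40000 in
theorem pvKeys_nodup : pvCvKeys.Nodup ∧ pvVcKeys.Nodup ∧ pvVvKeys.Nodup := by decide

-- a triple fold whose components do not interact splits into three folds
theorem pv_foldl_triple {α β γ δ : Type} (L : List δ)
    (f : α → δ → α) (g : β → δ → β) (h : γ → δ → γ) (a : α) (b : β) (c : γ) :
    L.foldl (fun t x => (f t.1 x, g t.2.1 x, h t.2.2 x)) (a, b, c)
      = (L.foldl f a, L.foldl g b, L.foldl h c) := by
  induction L generalizing a b c with
  | nil => rfl
  | cons x L ih => simp [List.foldl_cons, ih]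

-- A's inner index loop over range(1, len w) is a fold over the adjacent-pair keys
theorem pv_inner_loop_eq {α : Type} (p : String) (g : α → String → α) (init : α) :
    (PySem.List.pyRange 1 (PySem.List.len (PySem.Str.split₀ p)) 1).foldl
      (fun acc j => g acc (PySem.List.pyGetD (PySem.Str.split₀ p) (j - 1) "" ++ " " ++ PySem.List.pyGetD (PySem.Str.split₀ p) j "")) init
      = (pvPairsOf p).foldl g init := by
  simp only [pvPairsOf]
  set w := PySem.Str.split₀ p with hw
  have hm : (PySem.List.len w - 1).toNat = w.length - 1 := by
    simp [PySem.List.len]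
  have hkeys : (List.range (w.length - 1)).map
      (fun k : Nat => PySem.List.pyGetD w ((1 : Int) + (k : Int) - 1) "" ++ " " ++ PySem.List.pyGetD w ((1 : Int) + (k : Int)) "")
      = (w.zip w.tail).map (fun ab => ab.1 ++ " " ++ ab.2) := by
    apply List.ext_getElem
    · simp
    · intro i h1 h2
      have hi : i < w.length - 1 := by simpa using h1
      simp only [List.getElem_map, List.getElem_range, List.getElem_zip]
      have e1 : (1 : Int) + (i : Int) - 1 = ((i : Nat) : Int) := by ring
      have e2 : (1 : Int) + (i : Int) = (((i + 1 : Nat)) : Int) := by push_cast; ring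
      rw [e1, e2, PySem.List.pyGetD_natCast, PySem.List.pyGetD_natCast]
      rw [List.getD_eq_getElem w _ (by omega), List.getD_eq_getElem w _ (by omega)]
      simp [List.getElem_tail]
  have h := congrArg (fun l => List.foldl g init l) hkeys
  simp only [List.foldl_map] at h
  rw [PySem.List.pyRange_one, hm, List.foldl_map, List.foldl_map]
  simpa using h

-- folding A's update over a pair list adds per-key occurrence counts
theorem pv_upd_fold (L : List String) (keys : List String) (hnd : keys.Nodup)
    (d : PySem.Dict String Int) (c : String → Int)
    (hitems : d.items = keys.map (fun k => (k, c k))) :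
    (L.foldl pvUpd d).items = keys.map (fun k => (k, c k + L.count k)) := by
  induction L generalizing d c with
  | nil => simpa using hitems
  | cons x L ih =>
    have hkeys : d.keys = keys := by
      have hc : ((fun x : String × Int => x.1) ∘ fun k => (k, c k)) = (id : String → String) := rfl
      simp only [PySem.Dict.keys, hitems, List.map_map, hc, List.map_id]
    have hknd : d.keys.Nodup := by rw [hkeys]; exact hnd
    by_cases hx : x ∈ keys
    · have hcont : d.contains x = true := by
        rw [PySem.Dict.contains_iff_mem_keys, hkeys]; exact hx
      have hmem : (x, c x) ∈ d.items := by rw [hitems]; exact List.mem_map_of_mem hx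
      have hgetD : d.getD x 0 = c x := PySem.Dict.getD_of_mem_items d hmem hknd 0
      have hstep : (pvUpd d x).items = keys.map (fun k => (k, if k = x then c x + 1 else c k)) := by
        rw [pvUpd, if_pos hcont, PySem.Dict.items_insert_of_contains _ _ hcont, hgetD, hitems,
          List.map_map]
        refine List.map_congr_left (fun k hk => ?_)
        by_cases hkx : k = x
        · subst hkx; simp
        · simp [hkx]
      have := ih (pvUpd d x) (fun k => if k = x then c x + 1 else c k) hstep
      rw [List.foldl_cons, this]
      refine List.map_congr_left (fun k hk => ?_)
      by_cases hkx : k = x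
      · subst hkx; simp; ring
      · simp [hkx, Ne.symm hkx]
    · have hcont : d.contains x = false := by
        rw [← Bool.not_eq_true, PySem.Dict.contains_iff_mem_keys, hkeys]; simpa using hx
      have hstep : pvUpd d x = d := by rw [pvUpd, hcont]; simp
      rw [List.foldl_cons, hstep, ih d c hitems]
      refine List.map_congr_left (fun k hk => ?_)
      have : x ≠ k := fun h => hx (h ▸ hk)
      simp [this]

-- fold over Nodup keys with fresh inserts gives items = map
theorem pv_items_fresh (keys : List String) (f : String → Int) (hnd : keys.Nodup) :
    (keys.foldl (fun d k => d.insert k (f k)) (PySem.Dict.empty : PySem.Dict String Int)).items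
      = keys.map (fun k => (k, f k)) := by
  have h := PySem.Dict.items_foldl_insert_fresh (l := keys) (k := fun x => x) (v := f)
    (d := (PySem.Dict.empty : PySem.Dict String Int))
    (by intro a _; simp [PySem.Dict.contains_empty]) (by simpa using hnd)
  simpa using h

-- ===== VERDICT (by name: the statement is the Claim_ definition above) =====
set_option maxRecDepth 40000 in
theorem count_phoneme_chain2_spec : Claim_equal_count_phoneme_chain2 := by
  intro phonemes _
  unfold Spec_count_phoneme_chain2
  simp only [count_phoneme_chain2, count_phoneme_chain2_alt]
  -- A's outer loop is a fold over phonemes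
  rw [PySem.List.foldl_pyRange_zero_pyGetD phonemes "" pvInnerA]
  -- the body of A's loop is a fold of pvStep over the pair keys
  have hInner : pvInnerA = fun t s => (pvPairsOf s).foldl pvStep t := by
    funext t s
    exact pv_inner_loop_eq s pvStep t
  rw [hInner, ← List.foldl_flatMap]
  -- B's counting loop is a fold over the same flattened pair list
  rw [← List.foldl_flatMap]
  -- split the triple fold and evaluate each dict
  rw [show pvStep = (fun t x => (pvUpd t.1 x, pvUpd t.2.1 x, pvUpd t.2.2 x)) from rfl,
    pv_foldl_triple]
  rw [pv_upd_fold _ pvCvKeys pvKeys_nodup.1 _ (fun _ => (0 : Int)) (by decide),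
    pv_upd_fold _ pvVcKeys pvKeys_nodup.2.1 _ (fun _ => (0 : Int)) (by decide),
    pv_upd_fold _ pvVvKeys pvKeys_nodup.2.2 _ (fun _ => (0 : Int)) (by decide)]
  rw [pv_items_fresh (phoneConsonant.flatMap (fun c => phoneVowel.map (fun v => c ++ " " ++ v))) _ pvKeys_nodup.1,
    pv_items_fresh (phoneVowel.flatMap (fun v => phoneConsonant.map (fun c => v ++ " " ++ c))) _ pvKeys_nodup.2.1,
    pv_items_fresh (phoneVowel.flatMap (fun x => phoneVowel.map (fun y => x ++ " " ++ y))) _ pvKeys_nodup.2.2]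
  simp only [Prod.mk.injEq]
  refine ⟨?_, ?_, ?_⟩ <;>
    exact List.map_congr_left (fun k hk => by
      simp [PySem.Dict.getD_foldl_insert_add_one, PySem.Dict.getD_empty])
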